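-- pv_equiv track=rewrite | github.com/TUI-NICR/nicr-multitask-scene-analysis | nicr_mt_scene_analysis/visualization/instance.py | _get_simple_colormap
-- ===== SOURCE A (Python) =====
-- from typing import Dict, Optional, Tuple, Union
--
-- def _get_simple_colormap(n: int) -> Tuple[Tuple[int, int, int]]:
--     # n <= 256
--     def bitget(byteval, idx):
--         return (byteval & (1 << idx)) != 0
--
--     cmap = []
--     for i in range(n):
--         r = g = b = 0
--         c = i
--         for j in range(8):
--             r = r | (bitget(c, 0) << 7-j)
--             g = g | (bitget(c, 1) << 7-j)
--             b = b | (bitget(c, 2) << 7-j)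
--             c = c >> 3
--         cmap.append((r, g, b))
--
--     return tuple(cmap)
-- ===== SOURCE B (Python) =====
-- # Byte-reversal table + strided-bit gather, instead of an interleaved shift-OR loop.
-- _REV = [((v * 0x0202020202) & 0x010884422010) % 1023 for v in range(256)]
--
-- def _compact(i, off):
--     # gather every third bit of i (starting at 'off') into one byte
--     return sum(((i >> (3 * j + off)) & 1) << j for j in range(8))
--
-- def _get_simple_colormap(n):
--     return tuple((_REV[_compact(i, 0)], _REV[_compact(i, 1)], _REV[_compact(i, 2)])
--                  for i in range(n))
-- ===== Notes on version B (the rewrite author's own statement) =====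
-- stated objective: alternative
-- what changed: Replaces the interleaved 8-step shift-OR loop per color by gathering each channel's strided bits into one byte and reversing it through a precomputed 256-entry bit-reversal table built with a closed-form multiply/mask/mod trick.
import Mathlib
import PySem

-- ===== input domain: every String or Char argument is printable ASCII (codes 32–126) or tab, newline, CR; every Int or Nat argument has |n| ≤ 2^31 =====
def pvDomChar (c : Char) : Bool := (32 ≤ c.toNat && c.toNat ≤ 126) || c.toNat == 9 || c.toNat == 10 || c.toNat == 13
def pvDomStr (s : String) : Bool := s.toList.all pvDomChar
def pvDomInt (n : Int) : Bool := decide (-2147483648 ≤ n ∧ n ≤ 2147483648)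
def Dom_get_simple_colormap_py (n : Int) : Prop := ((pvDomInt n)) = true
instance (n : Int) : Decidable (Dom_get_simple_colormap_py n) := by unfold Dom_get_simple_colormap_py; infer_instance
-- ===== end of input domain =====

-- B replaces A's interleaved 8-step shift-OR loop per color by a strided-bit gather plus a
-- precomputed 256-entry byte-reversal table (alternative algorithm, same complexity).

-- ===== PORT A =====
-- bitget(byteval, idx) = (byteval & (1 << idx)) != 0
def pvBitget (byteval : Int) (idx : Nat) : Bool := PySem.Int.band byteval (1 <<< idx) != 0

-- the body of A's outer loop: the inner 8-iteration loop over state (r, g, b, c)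
-- ('bitget(c, k) << 7-j' is (if bitget then 1 else 0) <<< (7-j); '(7-j).toNat' is exact since j ∈ [0,7])
def pvARow (i : Int) : Int × Int × Int :=
  let st := (PySem.List.pyRange 0 8 1).foldl
    (fun (st : Int × Int × Int × Int) j =>
      (PySem.Int.bor st.1 ((if pvBitget st.2.2.2 0 then (1:Int) else 0) <<< ((7 - j).toNat : Nat)),
       PySem.Int.bor st.2.1 ((if pvBitget st.2.2.2 1 then (1:Int) else 0) <<< ((7 - j).toNat : Nat)),
       PySem.Int.bor st.2.2.1 ((if pvBitget st.2.2.2 2 then (1:Int) else 0) <<< ((7 - j).toNat : Nat)),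
       st.2.2.2 >>> (3:Nat)))
    (0, 0, 0, i)
  (st.1, st.2.1, st.2.2.1)

def get_simple_colormap_py (n : Int) : List (Int × Int × Int) :=
  (PySem.List.pyRange 0 n 1).foldl (fun cmap i => cmap ++ [pvARow i]) []

-- ===== PORT B =====
-- _REV: ((v * 0x0202020202) & 0x010884422010) % 1023 for v in range(256)
def pvRev : List Int :=
  (PySem.List.pyRange 0 256 1).map (fun v =>
    PySem.Int.mod (PySem.Int.band (v * 0x0202020202) 0x010884422010) 1023)

-- _compact(i, off): the shift amount '3*j+off' is nonnegative on range(8), ported as '3*j.toNat+off'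
def pvCompact (i : Int) (off : Nat) : Int :=
  ((PySem.List.pyRange 0 8 1).map
    (fun j => (PySem.Int.band (i >>> ((3 * j.toNat + off : Nat))) 1) <<< (j.toNat : Nat))).sum

-- _REV[rc]: rc always lies in [0, 256) (proved below), so pyGetD's default is never used
def pvBRow (i : Int) : Int × Int × Int :=
  (PySem.List.pyGetD pvRev (pvCompact i 0) 0,
   PySem.List.pyGetD pvRev (pvCompact i 1) 0,
   PySem.List.pyGetD pvRev (pvCompact i 2) 0)

def get_simple_colormap_py_alt (n : Int) : List (Int × Int × Int) :=
  (PySem.List.pyRange 0 n 1).map pvBRow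

-- ===== PRECONDITION & SPEC =====
def Spec_get_simple_colormap_py (n : Int) (out : List (Int × Int × Int)) : Prop := out = get_simple_colormap_py_alt n
instance (n : Int) (out : List (Int × Int × Int)) : Decidable (Spec_get_simple_colormap_py n out) := by unfold Spec_get_simple_colormap_py; infer_instance

-- ===== CLAIM (what is proved, stated in full; the proofs are below) =====
def Claim_equal_get_simple_colormap_py : Prop := ∀ (n : Int), Dom_get_simple_colormap_py n → Spec_get_simple_colormap_py n (get_simple_colormap_py n)

-- ===== LEMMAS AND PROOFS =====

lemma natbit (m idx : Nat) : (m &&& 2^idx ≠ 0) ↔ ((m >>> idx) &&& 1 = 1) := by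
  rw [Nat.and_two_pow, Nat.and_one_is_mod]
  have h : Nat.testBit m idx = decide ((m >>> idx) % 2 = 1) := by
    unfold Nat.testBit
    rw [Nat.and_comm, Nat.and_one_is_mod]
    rcases Nat.mod_two_eq_zero_or_one (m >>> idx) with h | h <;> simp [h]
  rw [h]
  rcases Nat.mod_two_eq_zero_or_one (m >>> idx) with h2 | h2 <;> simp [h2]

lemma cast_sr (m k : Nat) : ((m : Int) >>> k) = ((m >>> k : Nat) : Int) := Int.mem_toNat?.mp rfl

lemma bitget_eq (x : Int) (hx : 0 ≤ x) (idx : Nat) :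
    pvBitget x idx = (PySem.Int.band (x >>> idx) 1 == 1) := by
  obtain ⟨m, rfl⟩ := Int.eq_ofNat_of_zero_le hx
  unfold pvBitget
  rw [cast_sr, show ((1:Nat) <<< idx) = 2^idx from by rw [Nat.shiftLeft_eq, one_mul],
      PySem.Int.band_natCast, show (1:Int) = ((1:Nat):Int) from rfl, PySem.Int.band_natCast]
  rw [Bool.eq_iff_iff]
  simp [natbit m idx]
  rw [cast_sr]
  omega

lemma band01 (x : Int) (hx : 0 ≤ x) : 0 ≤ PySem.Int.band x 1 ∧ PySem.Int.band x 1 ≤ 1 := by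
  obtain ⟨m, rfl⟩ := Int.eq_ofNat_of_zero_le hx
  rw [show (1:Int) = ((1:Nat):Int) from rfl, PySem.Int.band_natCast, Nat.and_one_is_mod]
  omega

lemma band_or (x : Int) (hx : 0 ≤ x) : PySem.Int.band x 1 = 0 ∨ PySem.Int.band x 1 = 1 := by
  have := band01 x hx; omega

lemma compact_bounds (i : Int) (hi : 0 ≤ i) (off : Nat) :
    0 ≤ pvCompact i off ∧ pvCompact i off < 256 := by
  unfold pvCompact
  rw [show PySem.List.pyRange 0 8 1 = [0,1,2,3,4,5,6,7] from by decide]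
  simp only [List.map, List.sum_cons, List.sum_nil]
  simp only [show Int.toNat 0 = 0 from rfl, show Int.toNat 1 = 1 from rfl,
    show Int.toNat 2 = 2 from rfl, show Int.toNat 3 = 3 from rfl, show Int.toNat 4 = 4 from rfl,
    show Int.toNat 5 = 5 from rfl, show Int.toNat 6 = 6 from rfl, show Int.toNat 7 = 7 from rfl,
    ]
  norm_num [Int.shiftLeft_eq]
  have h0 := band01 (i >>> off) (Int.le_shiftRight_of_nonneg hi)
  have h1 := band01 (i >>> (3+off)) (Int.le_shiftRight_of_nonneg hi)
  have h2 := band01 (i >>> (6+off)) (Int.le_shiftRight_of_nonneg hi)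
  have h3 := band01 (i >>> (9+off)) (Int.le_shiftRight_of_nonneg hi)
  have h4 := band01 (i >>> (12+off)) (Int.le_shiftRight_of_nonneg hi)
  have h5 := band01 (i >>> (15+off)) (Int.le_shiftRight_of_nonneg hi)
  have h6 := band01 (i >>> (18+off)) (Int.le_shiftRight_of_nonneg hi)
  have h7 := band01 (i >>> (21+off)) (Int.le_shiftRight_of_nonneg hi)
  omega

lemma elem (i : Int) (hi : 0 ≤ i) : pvARow i = pvBRow i := by
  have hc0 := compact_bounds i hi 0
  have hc1 := compact_bounds i hi 1
  have hc2 := compact_bounds i hi 2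
  unfold pvARow pvBRow
  simp only [pvRev]
  rw [PySem.List.pyGetD_map_pyRange_of_nonneg _ 256 _ _ hc0.1 hc0.2,
      PySem.List.pyGetD_map_pyRange_of_nonneg _ 256 _ _ hc1.1 hc1.2,
      PySem.List.pyGetD_map_pyRange_of_nonneg _ 256 _ _ hc2.1 hc2.2]
  unfold pvCompact
  rw [show PySem.List.pyRange 0 8 1 = [0,1,2,3,4,5,6,7] from by decide]
  simp only [List.foldl, List.map, List.sum_cons, List.sum_nil,
    show Int.toNat 0 = 0 from rfl, show Int.toNat 1 = 1 from rfl,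
    show Int.toNat 2 = 2 from rfl, show Int.toNat 3 = 3 from rfl, show Int.toNat 4 = 4 from rfl,
    show Int.toNat 5 = 5 from rfl, show Int.toNat 6 = 6 from rfl, show Int.toNat 7 = 7 from rfl]
  norm_num
  simp only [← Int.shiftRight_add]
  norm_num
  simp only [bitget_eq _ hi, bitget_eq _ (Int.le_shiftRight_of_nonneg hi)]
  norm_num
  simp only [← Int.shiftRight_add]
  norm_num
  simp only [show Int.toNat 2 = 2 from rfl, show Int.toNat 3 = 3 from rfl, show Int.toNat 4 = 4 from rfl,
    show Int.toNat 5 = 5 from rfl, show Int.toNat 6 = 6 from rfl, show Int.toNat 7 = 7 from rfl]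
  have hb : ∀ k : Nat, PySem.Int.band (i >>> k) 1 = 0 ∨ PySem.Int.band (i >>> k) 1 = 1 :=
    fun k => band_or _ (Int.le_shiftRight_of_nonneg hi)
  have hb0 := band_or i hi
  refine ⟨?_, ?_, ?_⟩
  · rcases hb0 with h0|h0 <;> rcases hb 3 with h1|h1 <;> rcases hb 6 with h2|h2 <;>
      rcases hb 9 with h3|h3 <;> rcases hb 12 with h4|h4 <;> rcases hb 15 with h5|h5 <;>
      rcases hb 18 with h6|h6 <;> rcases hb 21 with h7|h7 <;>
      simp only [h0,h1,h2,h3,h4,h5,h6,h7] <;> decide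
  · rcases hb 1 with h0|h0 <;> rcases hb 4 with h1|h1 <;> rcases hb 7 with h2|h2 <;>
      rcases hb 10 with h3|h3 <;> rcases hb 13 with h4|h4 <;> rcases hb 16 with h5|h5 <;>
      rcases hb 19 with h6|h6 <;> rcases hb 22 with h7|h7 <;>
      simp only [h0,h1,h2,h3,h4,h5,h6,h7] <;> decide
  · rcases hb 2 with h0|h0 <;> rcases hb 5 with h1|h1 <;> rcases hb 8 with h2|h2 <;>
      rcases hb 11 with h3|h3 <;> rcases hb 14 with h4|h4 <;> rcases hb 17 with h5|h5 <;>
      rcases hb 20 with h6|h6 <;> rcases hb 23 with h7|h7 <;>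
      simp only [h0,h1,h2,h3,h4,h5,h6,h7] <;> decide

-- ===== VERDICT (by name: the statement is the Claim_ definition above) =====
theorem get_simple_colormap_py_spec : Claim_equal_get_simple_colormap_py := by
  intro n _
  unfold Spec_get_simple_colormap_py get_simple_colormap_py get_simple_colormap_py_alt
  rw [PySem.List.foldl_append_singleton_eq_map]
  apply List.map_congr_left
  intro i him
  exact elem i (PySem.List.mem_pyRange_one.mp him).1
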